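-- pv_equiv track=rewrite | github.com/KSH23/algorithm_practice | Programmers/43238.py | solution
-- ===== SOURCE A (Python) =====
-- def solution(n, times):
--     left = 1  # 1분
--     right = n * min(times)  # 모든 사람이 심라는 받는데 걸리는 최대 시간
--
--     # 특정 시간 X분까지 심사할 수 있는 사람의 수는 각 심사관이 심사할 수 있는 시간을
--     # X분에 대하여 나눈 몫의 합이므로 이분탐색을 통해 몫의 합이 n에 도달하도록 탐색
--     while left < right:
--         mid = (left + right) // 2  # 중간 시간
--
--         cnt = sum(mid // time for time in times)  # 심사할 수 있는 사람의 수
--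
--         if n <= cnt:
--             right = mid
--         else:
--             left = mid + 1
--
--     return left
-- ===== SOURCE B (Python) =====
-- def solution(n, times):
--     # least X >= 1 with sum(X//t) >= n, found by a doubling/bit-descent search
--     hi = n * min(times)
--     step = 1
--     while step < hi:
--         step *= 2
--     x = 0  # invariant: sum(x//t) < n; the answer lies in (x, x + 2*step + 1]
--     while step >= 1:
--         c = x + step
--         if c < hi and sum(c // t for t in times) < n:
--             x = c
--         step //= 2
--     return x + 1
-- ===== Notes on version B (the rewrite author's own statement) =====
-- stated objective: alternative
-- what changed: Replaces the two-pointer [left,right] binary search with a doubling phase plus a descending power-of-two bit search that accumulates the largest X with sum(X//t) < n and returns X+1.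
-- outside the precondition, e.g. on solution(-2, [-3, -3]): A returns 1, B returns 6
import Mathlib
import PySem

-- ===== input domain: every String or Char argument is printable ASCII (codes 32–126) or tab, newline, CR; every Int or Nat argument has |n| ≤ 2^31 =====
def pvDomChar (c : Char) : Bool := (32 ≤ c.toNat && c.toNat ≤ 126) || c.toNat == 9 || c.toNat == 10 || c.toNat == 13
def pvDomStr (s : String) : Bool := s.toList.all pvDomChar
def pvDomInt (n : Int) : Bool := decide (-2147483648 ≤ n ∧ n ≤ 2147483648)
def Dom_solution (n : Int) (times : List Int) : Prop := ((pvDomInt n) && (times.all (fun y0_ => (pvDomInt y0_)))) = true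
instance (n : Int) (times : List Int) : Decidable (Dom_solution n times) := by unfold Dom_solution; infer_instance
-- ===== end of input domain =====

-- B replaces A's [left,right] midpoint binary search with a doubling phase plus a
-- descending power-of-two bit search (objective: a genuinely different decomposition
-- of the same O(|times|·log(n·min times)) search; no speed claim).

-- ===== PORT A =====
-- the 'while left < right' binary-search loop of A
def solutionLoopA (n : Int) (times : List Int) (left right : Int) : Int :=
  if h : left < right then
    let mid := PySem.Int.floordiv (left + right) 2
    let cnt := (times.map (fun time => PySem.Int.floordiv mid time)).sum
    if n ≤ cnt then solutionLoopA n times left mid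
    else solutionLoopA n times (mid + 1) right
  else left
termination_by (right - left).toNat
decreasing_by
  · have h1 := (PySem.Int.le_floordiv_iff_mul_le (a := left + right) (b := 2) (q := left) (by omega)).mpr (by omega)
    have h2 := (PySem.Int.floordiv_lt_iff_lt_mul (a := left + right) (b := 2) (q := right) (by omega)).mpr (by omega)
    omega
  · have h1 := (PySem.Int.le_floordiv_iff_mul_le (a := left + right) (b := 2) (q := left) (by omega)).mpr (by omega)
    have h2 := (PySem.Int.floordiv_lt_iff_lt_mul (a := left + right) (b := 2) (q := right) (by omega)).mpr (by omega)
    omega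

def solution (n : Int) (times : List Int) : Int :=
  match PySem.List.min? times (fun t => t) with
  | none => 0  -- unreachable under Pre_solution: Python raises ValueError on min([])
  | some m => solutionLoopA n times 1 (n * m)

-- ===== PORT B =====
-- 'while step < hi: step *= 2' (only ever entered with 1 ≤ step, carried as hs for termination)
def solutionGrowB (hi step : Int) (hs : 1 ≤ step) : Int :=
  if h : step < hi then solutionGrowB hi (step * 2) (by omega) else step
termination_by (hi - step).toNat
decreasing_by omega

-- 'while step >= 1: … step //= 2'
def solutionDescB (n : Int) (times : List Int) (hi x step : Int) : Int :=
  if h : 1 ≤ step then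
    let c := x + step
    let x' := if c < hi ∧ (times.map (fun t => PySem.Int.floordiv c t)).sum < n then c else x
    solutionDescB n times hi x' (PySem.Int.floordiv step 2)
  else x
termination_by step.toNat
decreasing_by
  rw [PySem.Int.floordiv_eq_ediv_of_pos (by omega : (0:Int) < 2)]
  omega

def solution_alt (n : Int) (times : List Int) : Int :=
  match PySem.List.min? times (fun t => t) with
  | none => 0  -- unreachable under Pre_solution: Python raises ValueError on min([])
  | some m =>
    let hi := n * m
    let step := solutionGrowB hi 1 (by omega)
    solutionDescB n times hi 0 step + 1

-- ===== PRECONDITION & SPEC =====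
-- Pre_ excludes empty `times` (A raises ValueError there) and inputs with n < 0 together
-- with a non-positive entry in `times`, where A's returned value (and a possible
-- ZeroDivisionError) comes from binary-searching over negative divisors, a corner no
-- caller of this airport-inspection task specifies.
def Pre_solution (n : Int) (times : List Int) : Prop :=
  times ≠ [] ∧ (0 ≤ n ∨ ∀ t ∈ times, 1 ≤ t)
instance (n : Int) (times : List Int) : Decidable (Pre_solution n times) := by
  unfold Pre_solution; infer_instance

def pvWitness_solution : Int × List Int := (6, [7, 10])

def Spec_solution (n : Int) (times : List Int) (out : Int) : Prop := out = solution_alt n times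
instance (n : Int) (times : List Int) (out : Int) : Decidable (Spec_solution n times out) := by
  unfold Spec_solution; infer_instance

-- ===== CLAIM (what is proved, stated in full; the proofs are below) =====
def Claim_equal_solution : Prop := ∀ (n : Int) (times : List Int), Dom_solution n times → Pre_solution n times → Spec_solution n times (solution n times)

-- ===== LEMMAS AND PROOFS =====

-- the count both programs compare against n
def pvCnt (times : List Int) (x : Int) : Int :=
  (times.map (fun t => PySem.Int.floordiv x t)).sum

theorem pvCnt_mono {times : List Int} (ht : ∀ t ∈ times, 1 ≤ t) {x y : Int} (hxy : x ≤ y) :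
    pvCnt times x ≤ pvCnt times y := by
  induction times with
  | nil => simp [pvCnt]
  | cons a l ih =>
    have ha : (1:Int) ≤ a := ht a (by simp)
    have hl : ∀ t ∈ l, (1:Int) ≤ t := fun t htl => ht t (by simp [htl])
    have := ih hl
    simp only [pvCnt, List.map_cons, List.sum_cons] at *
    have hdiv : PySem.Int.floordiv x a ≤ PySem.Int.floordiv y a := by
      rw [PySem.Int.floordiv_eq_ediv_of_pos (by omega), PySem.Int.floordiv_eq_ediv_of_pos (by omega)]
      exact Int.ediv_le_ediv (by omega) hxy
    omega

theorem pvCnt_zero {times : List Int} (ht : ∀ t ∈ times, 1 ≤ t) : pvCnt times 0 = 0 := by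
  induction times with
  | nil => simp [pvCnt]
  | cons a l ih =>
    have ha : (1:Int) ≤ a := ht a (by simp)
    have hl : ∀ t ∈ l, (1:Int) ≤ t := fun t htl => ht t (by simp [htl])
    simp only [pvCnt, List.map_cons, List.sum_cons] at *
    rw [PySem.Int.floordiv_eq_ediv_of_pos (by omega), Int.zero_ediv, ih hl]
    omega

theorem pvCnt_hi {times : List Int} {n m : Int} (ht : ∀ t ∈ times, 1 ≤ t)
    (hm : m ∈ times) (hn : 0 ≤ n) : n ≤ pvCnt times (n * m) := by
  have hm1 : (1:Int) ≤ m := ht m hm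
  have hkey : PySem.Int.floordiv (n * m) m = n := by
    rw [PySem.Int.floordiv_eq_ediv_of_pos (by omega)]
    exact Int.mul_ediv_cancel n (by omega)
  have hnonneg : ∀ z ∈ times.map (fun t => PySem.Int.floordiv (n * m) t), 0 ≤ z := by
    intro z hz
    rcases List.mem_map.mp hz with ⟨t, htm, rfl⟩
    have ht1 : (1:Int) ≤ t := ht t htm
    rw [PySem.Int.floordiv_eq_ediv_of_pos (by omega)]
    exact Int.ediv_nonneg (by positivity) (by omega)
  have hmem : PySem.Int.floordiv (n * m) m ∈ times.map (fun t => PySem.Int.floordiv (n * m) t) :=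
    List.mem_map_of_mem hm
  have := List.single_le_sum hnonneg _ hmem
  simpa [pvCnt, hkey] using this

-- A's binary search returns the unique v with l ≤ v ≤ r, n ≤ cnt v, ¬ n ≤ cnt (v-1)
theorem loopA_spec (n : Int) (times : List Int) :
    ∀ l r : Int, l ≤ r → n ≤ pvCnt times r → ¬ n ≤ pvCnt times (l - 1) →
      (n ≤ pvCnt times (solutionLoopA n times l r) ∧
       ¬ n ≤ pvCnt times (solutionLoopA n times l r - 1) ∧
       l ≤ solutionLoopA n times l r ∧ solutionLoopA n times l r ≤ r) := by
  suffices H : ∀ (k : ℕ) (l r : Int), (r - l).toNat = k → l ≤ r → n ≤ pvCnt times r →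
      ¬ n ≤ pvCnt times (l - 1) →
      (n ≤ pvCnt times (solutionLoopA n times l r) ∧
       ¬ n ≤ pvCnt times (solutionLoopA n times l r - 1) ∧
       l ≤ solutionLoopA n times l r ∧ solutionLoopA n times l r ≤ r) by
    intro l r; exact H ((r - l).toNat) l r rfl
  intro k
  induction k using Nat.strong_induction_on with
  | _ k ih =>
    intro l r hk hlr hr hl
    rw [solutionLoopA]
    split
    · next hlt =>
      have h1 := (PySem.Int.le_floordiv_iff_mul_le (a := l + r) (b := 2) (q := l) (by omega)).mpr (by omega)
      have h2 := (PySem.Int.floordiv_lt_iff_lt_mul (a := l + r) (b := 2) (q := r) (by omega)).mpr (by omega)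
      set mid := PySem.Int.floordiv (l + r) 2 with hmid
      simp only
      split
      · next hcnt =>
        have := ih ((mid - l).toNat) (by omega) l mid rfl (by omega) hcnt hl
        exact ⟨this.1, this.2.1, this.2.2.1, by omega⟩
      · next hcnt =>
        have := ih ((r - (mid + 1)).toNat) (by omega) (mid + 1) r rfl (by omega) hr
          (by simpa using hcnt)
        exact ⟨this.1, this.2.1, by omega, this.2.2.2⟩
    · next hlt =>
      have : l = r := by omega
      exact ⟨by rwa [this], by simpa using hl, le_refl _, by omega⟩

-- the doubling loop returns a power of two ≥ hi (and ≥ step)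
theorem growB_spec (hi : Int) :
    ∀ (step : Int) (hs : 1 ≤ step), (∃ k : ℕ, step = 2 ^ k) →
      ∃ k : ℕ, solutionGrowB hi step hs = 2 ^ k ∧ hi ≤ 2 ^ k := by
  suffices H : ∀ (j : ℕ) (step : Int) (hs : 1 ≤ step), (hi - step).toNat = j →
      (∃ k : ℕ, step = 2 ^ k) → ∃ k : ℕ, solutionGrowB hi step hs = 2 ^ k ∧ hi ≤ 2 ^ k by
    intro step hs; exact H ((hi - step).toNat) step hs rfl
  intro j
  induction j using Nat.strong_induction_on with
  | _ j ih =>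
    intro step hs hj hpow
    rw [solutionGrowB]
    split
    · next hlt =>
      rcases hpow with ⟨k, rfl⟩
      exact ih ((hi - 2 ^ k * 2).toNat) (by omega) _ (by omega) rfl ⟨k + 1, by ring⟩
    · next hlt =>
      rcases hpow with ⟨k, rfl⟩
      exact ⟨k, rfl, by omega⟩

theorem two_pow_fdiv (k : ℕ) : PySem.Int.floordiv ((2:Int) ^ (k + 1)) 2 = 2 ^ k := by
  rw [PySem.Int.floordiv_eq_ediv_of_pos (by omega), pow_succ]
  exact Int.mul_ediv_cancel _ (by omega)

-- the bit-descent loop, started at a power of two, lands exactly on L - 1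
theorem descB_spec (n : Int) (times : List Int) (hi L : Int)
    (ht : ∀ t ∈ times, 1 ≤ t)
    (hL : n ≤ pvCnt times L) (hL1 : ¬ n ≤ pvCnt times (L - 1)) (hLhi : L ≤ hi) :
    ∀ (k : ℕ) (x : Int), ¬ n ≤ pvCnt times x → L ≤ x + 2 * 2 ^ k →
      solutionDescB n times hi x (2 ^ k) = L - 1 := by
  have habove : ∀ y : Int, n ≤ pvCnt times y → L ≤ y := by
    intro y hy
    by_contra hc
    exact hL1 (le_trans hy (pvCnt_mono ht (by omega)))
  have hps : ∀ y : Int, (times.map (fun t => PySem.Int.floordiv y t)).sum = pvCnt times y :=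
    fun _ => rfl
  have hbelow : ∀ y : Int, pvCnt times y < n → y + 1 ≤ L := by
    intro y hy
    by_contra hc
    have : n ≤ pvCnt times y := le_trans hL (pvCnt_mono ht (by omega))
    omega
  intro k
  induction k with
  | zero =>
    intro x hx hb
    simp only [pow_zero] at hb ⊢
    have hstep : PySem.Int.floordiv (1:Int) 2 = 0 := by
      rw [PySem.Int.floordiv_eq_ediv_of_pos (by omega)]; decide
    rw [solutionDescB]
    split
    · next h1 =>
      simp only [hps, hstep]
      rw [solutionDescB]
      split
      · next h0 => omega
      · next h0 =>
        split
        · next hcond =>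
          -- took the last bit: pvCnt (x+1) < n forces L ≥ x+2; hb gives L ≤ x+2
          have h2 := hbelow (x + 1) hcond.2
          omega
        · next hcond =>
          -- skipped: x+1 ≥ hi (then L ≤ hi ≤ x+1) or n ≤ pvCnt (x+1) (then L ≤ x+1)
          have hle : L ≤ x + 1 := by
            rcases Decidable.not_and_iff_or_not.mp hcond with hc | hc
            · omega
            · exact habove (x + 1) (by omega)
          have := hbelow x (by omega)
          omega
    · next h1 => omega
  | succ k ihk =>
    intro x hx hb
    have hpos : (0:Int) < 2 ^ (k + 1) := by positivity
    have hsplit : (2:Int) ^ (k + 1) = 2 * 2 ^ k := by ring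
    rw [solutionDescB]
    split
    · next h1 =>
      simp only [hps]
      rw [two_pow_fdiv]
      split
      · next hcond =>
        exact ihk (x + 2 ^ (k + 1)) (by have := hcond.2; omega) (by omega)
      · next hcond =>
        refine ihk x hx ?_
        have hle : L ≤ x + 2 ^ (k + 1) := by
          rcases Decidable.not_and_iff_or_not.mp hcond with hc | hc
          · omega
          · exact habove _ (by omega)
        omega
    · next h1 => omega

-- the trivial case hi ≤ 1: A's loop never runs, B never takes a bit; both give 1
theorem alt_trivial (n : Int) (times : List Int) (hi : Int) (hhi : hi ≤ 1) :
    solutionDescB n times hi 0 (solutionGrowB hi 1 (by omega)) + 1 = 1 := by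
  have hg : solutionGrowB hi 1 (by omega) = 1 := by
    rw [solutionGrowB]; split
    · next h => omega
    · rfl
  rw [hg, solutionDescB]
  split
  · next h1 =>
    have hstep : PySem.Int.floordiv (1:Int) 2 = 0 := by
      rw [PySem.Int.floordiv_eq_ediv_of_pos (by omega)]; decide
    simp only
    have hcond : ¬ ((0:Int) + 1 < hi ∧ (times.map (fun t => PySem.Int.floordiv (0 + 1) t)).sum < n) := by
      intro hc; omega
    rw [if_neg hcond, hstep, solutionDescB]
    split
    · next h0 => omega
    · rfl
  · next h1 => omega

-- ===== VERDICT (by name: the statement is the Claim_ definition above) =====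
theorem solution_spec : Claim_equal_solution := by
  intro n times _hdom hpre
  unfold Spec_solution
  obtain ⟨hne, hpre2⟩ := hpre
  unfold solution solution_alt
  rcases hmin : PySem.List.min? times (fun t => t) with _ | m
  · exact absurd ((PySem.List.min?_eq_none_iff times _).mp hmin) hne
  · simp only
    have hmem : m ∈ times := PySem.List.min?_mem hmin
    have hisMin : ∀ y ∈ times, m ≤ y := PySem.List.min?_isMin hmin
    by_cases hhi : n * m ≤ 1
    · -- both sides return 1
      rw [alt_trivial n times (n * m) hhi, solutionLoopA]
      split
      · next h => omega
      · rfl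
    · -- real search: here 1 ≤ m, 1 ≤ n and every t ≥ 1
      rw [not_le] at hhi
      have hm1 : (1:Int) ≤ m := by
        rcases hpre2 with hn0 | hall
        · by_contra hc
          have : n * m ≤ 0 := mul_nonpos_iff.mpr (Or.inl ⟨hn0, by omega⟩)
          omega
        · exact hall m hmem
      have hn1 : (1:Int) ≤ n := by
        by_contra hc
        have : n * m ≤ 0 := mul_nonpos_iff.mpr (Or.inr ⟨by omega, by omega⟩)
        omega
      have ht : ∀ t ∈ times, (1:Int) ≤ t := fun t htm => le_trans hm1 (hisMin t htm)
      have hcnt0 : ¬ n ≤ pvCnt times (1 - 1) := by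
        have := pvCnt_zero ht
        simp only [show (1:Int) - 1 = 0 by omega, this]
        omega
      have hcnthi : n ≤ pvCnt times (n * m) := pvCnt_hi ht hmem (by omega)
      obtain ⟨hA1, hA2, hA3, hA4⟩ := loopA_spec n times 1 (n * m) (by omega) hcnthi hcnt0
      set L := solutionLoopA n times 1 (n * m) with hLdef
      obtain ⟨k, hgk, hhik⟩ := growB_spec (n * m) 1 (by omega) ⟨0, by norm_num⟩
      rw [hgk]
      have hdesc := descB_spec n times (n * m) L ht hA1 hA2 hA4 k 0
        (by simpa [pvCnt_zero ht] using (by omega : ¬ n ≤ (0:Int)))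
        (by
          have h2k : (0:Int) < 2 ^ k := by positivity
          omega)
      rw [hdesc]
      omega
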